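-- pv_equiv track=rewrite | github.com/CarlosHeinze/PruebasDeSoftwareCarlosHeinze | A01700179_A4.2/P3/Source/wordCount.py | remove_whitespaces
-- ===== SOURCE A (Python) =====
-- def remove_whitespaces(word):
--     """
--     Converts an integer to binary and hex representations
--
--     Args:
--         word (str): Word to process.
--
--     Returns:
--         clean_word (str): word with no end of line or white characters.
--     """
--     whitespace = (' ', '\t', '\n', '\r')
--     clean_word = ""
--     for char in word:
--         if char in whitespace:
--             break
--         clean_word += char
--     return clean_word
-- ===== SOURCE B (Python) =====
-- import re
--
-- def remove_whitespaces(word):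
--     return re.match(r'[^ \t\n\r]*', word).group()
-- ===== Notes on version B (the rewrite author's own statement) =====
-- stated objective: idiomatic
-- what changed: Replaces the char-by-char accumulation loop with a single regex match of the leading run of non-whitespace characters (explicit class [^ \t\n\r], matching A's tuple exactly).
import Mathlib
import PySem

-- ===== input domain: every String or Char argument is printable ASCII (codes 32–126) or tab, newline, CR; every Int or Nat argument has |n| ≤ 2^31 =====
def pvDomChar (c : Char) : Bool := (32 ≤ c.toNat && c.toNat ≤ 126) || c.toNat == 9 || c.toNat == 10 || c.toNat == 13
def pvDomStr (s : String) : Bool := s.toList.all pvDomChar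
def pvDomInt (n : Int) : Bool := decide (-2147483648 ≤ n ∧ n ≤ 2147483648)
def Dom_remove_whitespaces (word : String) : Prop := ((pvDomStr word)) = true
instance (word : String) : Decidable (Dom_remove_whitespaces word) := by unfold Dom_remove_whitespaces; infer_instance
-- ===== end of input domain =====

-- B replaces A's char-by-char accumulation loop (with break) by a single regex
-- match of the leading non-whitespace run; equivalence of return values is proved.

-- ===== PORT A =====
-- the loop with `break`: recursion over the remaining chars carrying clean_word
def removeWsLoop : List Char → String → String
  | [], clean_word => clean_word
  | c :: cs, clean_word =>
    if c = ' ' ∨ c = '\t' ∨ c = '\n' ∨ c = '\r' then clean_word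
    else removeWsLoop cs (clean_word ++ c.toString)

def remove_whitespaces (word : String) : String :=
  removeWsLoop word.toList ""

-- ===== PORT B =====
-- re.match(r'[^ \t\n\r]*', word).group(): the maximal leading run of
-- characters outside the class, i.e. takeWhile of its complement.
def remove_whitespaces_alt (word : String) : String :=
  String.ofList (word.toList.takeWhile fun c =>
    !(c == ' ' || c == '\t' || c == '\n' || c == '\r'))

-- ===== PRECONDITION & SPEC =====
def Spec_remove_whitespaces (word : String) (out : String) : Prop := out = remove_whitespaces_alt word
instance (word : String) (out : String) : Decidable (Spec_remove_whitespaces word out) := by unfold Spec_remove_whitespaces; infer_instance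

-- ===== CLAIM (what is proved, stated in full; the proofs are below) =====
def Claim_equal_remove_whitespaces : Prop := ∀ (word : String), Dom_remove_whitespaces word → Spec_remove_whitespaces word (remove_whitespaces word)

-- ===== LEMMAS AND PROOFS =====
theorem removeWsLoop_eq (l : List Char) (acc : String) :
    removeWsLoop l acc =
      acc ++ String.ofList (l.takeWhile fun c =>
        !(c == ' ' || c == '\t' || c == '\n' || c == '\r')) := by
  induction l generalizing acc with
  | nil =>
    apply String.toList_injective
    simp [removeWsLoop]
  | cons c cs ih =>
    by_cases h : c = ' ' ∨ c = '\t' ∨ c = '\n' ∨ c = '\r'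
    · have hb : (!(c == ' ' || c == '\t' || c == '\n' || c == '\r')) = false := by
        rcases h with h | h | h | h <;> simp [h]
      simp only [removeWsLoop, h, if_true, List.takeWhile_cons, hb, Bool.false_eq_true,
        if_false]
      apply String.toList_injective
      simp
    · have hb : (!(c == ' ' || c == '\t' || c == '\n' || c == '\r')) = true := by
        push_neg at h
        simp [h.1, h.2.1, h.2.2.1, h.2.2.2]
      simp only [removeWsLoop, h, if_false, List.takeWhile_cons, hb, if_true]
      rw [ih]
      apply String.toList_injective
      simp

-- ===== VERDICT (by name: the statement is the Claim_ definition above) =====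
theorem remove_whitespaces_spec : Claim_equal_remove_whitespaces := by
  intro word _
  unfold Spec_remove_whitespaces remove_whitespaces remove_whitespaces_alt
  rw [removeWsLoop_eq]
  simp
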